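-- pv_equiv track=rewrite | github.com/vinayakasg18/coding_patterns | python/leet_code/top_100_easy/largest_nor_double.py | largest_double
-- ===== SOURCE A (Python) =====
-- from typing import List
--
-- def largest_double(nums: List[int]) -> int:
--     max_l = max(nums)
--     index = nums.index(max_l)
--     inx = []
--     for i in range(0, len(nums)):
--         if i != index and nums[i] * 2 <= max_l:
--             inx.append(i)
--
--     if len(inx) == len(nums) - 1:
--         return index
--     else:
--         return -1
-- ===== SOURCE B (Python) =====
-- from typing import List
--
-- def largest_double(nums: List[int]) -> int:
--     largest = max(nums)
--     index = nums.index(largest)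
--     rest = nums[:index] + nums[index + 1:]
--     if not rest or 2 * max(rest) <= largest:
--         return index
--     return -1
-- ===== Notes on version B (the rewrite author's own statement) =====
-- stated objective: idiomatic
-- what changed: Instead of building the list of qualifying other-indices and comparing its length to len(nums)-1, B makes one aggregate comparison: it takes the max of the remaining elements (the list with the first maximum removed) and returns the index iff twice that second maximum is at most the maximum.
import Mathlib
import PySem

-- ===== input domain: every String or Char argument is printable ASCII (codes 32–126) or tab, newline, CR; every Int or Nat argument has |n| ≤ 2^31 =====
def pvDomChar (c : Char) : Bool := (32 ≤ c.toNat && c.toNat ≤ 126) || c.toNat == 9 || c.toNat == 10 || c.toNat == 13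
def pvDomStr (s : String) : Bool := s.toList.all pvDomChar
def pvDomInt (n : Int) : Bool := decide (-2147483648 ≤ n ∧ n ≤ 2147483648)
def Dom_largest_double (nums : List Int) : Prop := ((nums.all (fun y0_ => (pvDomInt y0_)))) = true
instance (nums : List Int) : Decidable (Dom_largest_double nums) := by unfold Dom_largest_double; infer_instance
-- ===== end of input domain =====

-- B replaces A's count of qualifying other-indices by one aggregate comparison against the
-- maximum of the remaining elements (idiomatic; same O(n) cost).

-- ===== PORT A =====
def largest_double (nums : List Int) : Int :=
  match PySem.List.max? nums (fun x => x) with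
  | none => -1  -- unreachable: Pre_ excludes [], where Python's max raises ValueError
  | some max_l =>
    match PySem.List.index? nums max_l with
    | none => -1  -- unreachable: max_l ∈ nums
    | some index =>
      let inx : List Int := (PySem.List.pyRange 0 (nums.length : Int) 1).foldl
        (fun acc i =>
          if i ≠ (index : Int) ∧ PySem.List.pyGetD nums i 0 * 2 ≤ max_l then acc ++ [i]
          else acc) []
      if (inx.length : Int) = (nums.length : Int) - 1 then (index : Int) else -1

-- ===== PORT B =====
def largest_double_alt (nums : List Int) : Int :=
  match PySem.List.max? nums (fun x => x) with
  | none => -1  -- unreachable: Pre_ excludes [], where Python's max raises ValueError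
  | some largest =>
    match PySem.List.index? nums largest with
    | none => -1  -- unreachable: largest ∈ nums
    | some index =>
      let rest : List Int :=
        PySem.List.slice nums none (some (index : Int)) ++
        PySem.List.slice nums (some ((index : Int) + 1)) none
      match PySem.List.max? rest (fun x => x) with
      | none => (index : Int)                                  -- `not rest`
      | some m2 => if 2 * m2 ≤ largest then (index : Int) else -1

-- ===== PRECONDITION & SPEC =====
-- Pre_ excludes only the empty list, on which Python's max(nums) raises ValueError.
def Pre_largest_double (nums : List Int) : Prop := nums ≠ []
instance (nums : List Int) : Decidable (Pre_largest_double nums) := by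
  unfold Pre_largest_double; infer_instance
def pvWitness_largest_double : List Int := [1, 3, 0]

def Spec_largest_double (nums : List Int) (out : Int) : Prop := out = largest_double_alt nums
instance (nums : List Int) (out : Int) : Decidable (Spec_largest_double nums out) := by
  unfold Spec_largest_double; infer_instance

-- ===== CLAIM (what is proved, stated in full; the proofs are below) =====
def Claim_equal_largest_double : Prop :=
  ∀ (nums : List Int), Dom_largest_double nums → Pre_largest_double nums →
    Spec_largest_double nums (largest_double nums)

-- ===== LEMMAS AND PROOFS =====

-- counting all-but-one: the filter over `range n` has length n-1 iff every index other
-- than k passes, provided k itself fails the test.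
lemma filter_range_len {q : Nat → Bool} {n k : Nat} (hk : k < n) (hqk : q k = false) :
    ((List.range n).filter q).length = n - 1 ↔ ∀ j, j < n → j ≠ k → q j = true := by
  have hn : n = (k + 1) + (n - (k + 1)) := by omega
  have hsplit : List.range n
      = (List.range k ++ [k]) ++ (List.range (n - (k+1))).map (fun j => (k+1) + j) := by
    conv_lhs => rw [hn]
    rw [List.range_add, List.range_succ]
  rw [hsplit, List.filter_append, List.filter_append]
  have hmid : List.filter q [k] = [] := by simp [hqk]
  rw [hmid, List.filter_map]
  simp only [List.length_append, List.length_nil, List.length_map]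
  have h1le : (List.filter q (List.range k)).length ≤ k := by
    simpa using List.length_filter_le q (List.range k)
  have h2le : (List.filter (q ∘ fun j => (k+1)+j) (List.range (n - (k+1)))).length
      ≤ n - (k+1) := by
    simpa using List.length_filter_le _ (List.range (n - (k+1)))
  constructor
  · intro h j hj hjk
    have h1 : (List.filter q (List.range k)).length = (List.range k).length := by
      simp only [List.length_range]; omega
    have h2 : (List.filter (q ∘ fun j => (k+1)+j) (List.range (n - (k+1)))).length
        = (List.range (n - (k+1))).length := by
      simp only [List.length_range]; omega
    rw [List.length_filter_eq_length_iff] at h1 h2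
    rcases Nat.lt_or_ge j k with hlt | hge
    · exact h1 j (by simpa using hlt)
    · have : j = (k+1) + (j - (k+1)) := by omega
      rw [this]
      exact h2 (j - (k+1)) (by simp; omega)
  · intro h
    have h1 : (List.filter q (List.range k)).length = (List.range k).length := by
      rw [List.length_filter_eq_length_iff]
      intro a ha
      simp only [List.mem_range] at ha
      exact h a (by omega) (by omega)
    have h2 : (List.filter (q ∘ fun j => (k+1)+j) (List.range (n - (k+1)))).length
        = (List.range (n - (k+1))).length := by
      rw [List.length_filter_eq_length_iff]
      intro a ha
      simp only [List.mem_range] at ha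
      exact h ((k+1)+a) (by omega) (by omega)
    simp only [List.length_range] at h1 h2
    omega

-- membership in take k ++ drop (k+1) is exactly "value at some index ≠ k"
lemma mem_rest_iff {nums : List Int} {k : Nat} (hk : k < nums.length) (y : Int) :
    y ∈ List.take k nums ++ List.drop (k + 1) nums ↔
      ∃ j, ∃ h : j < nums.length, j ≠ k ∧ nums[j] = y := by
  rw [List.mem_append]
  constructor
  · rintro (h | h)
    · rw [List.mem_iff_getElem] at h
      obtain ⟨i, hi, hval⟩ := h
      have hik : i < k := by simpa using (lt_of_lt_of_le hi (by simp))
      refine ⟨i, by omega, by omega, ?_⟩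
      rw [List.getElem_take] at hval; exact hval
    · rw [List.mem_iff_getElem] at h
      obtain ⟨i, hi, hval⟩ := h
      have hlen : i < nums.length - (k+1) := by simpa using hi
      refine ⟨k + 1 + i, by omega, by omega, ?_⟩
      rw [List.getElem_drop] at hval; exact hval
  · rintro ⟨j, hj, hjk, hval⟩
    rcases Nat.lt_or_ge j k with hlt | hge
    · left
      rw [List.mem_iff_getElem]
      exact ⟨j, by simp; omega, by rw [List.getElem_take]; exact hval⟩
    · right
      rw [List.mem_iff_getElem]
      refine ⟨j - (k+1), by simp; omega, ?_⟩
      rw [List.getElem_drop]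
      have : k + 1 + (j - (k+1)) = j := by omega
      simp_rw [this]; exact hval

theorem largest_double_main (nums : List Int) (hpre : nums ≠ []) :
    largest_double nums = largest_double_alt nums := by
  unfold largest_double largest_double_alt
  obtain ⟨m, hm⟩ : ∃ m, PySem.List.max? nums (fun x => x) = some m := by
    cases h : PySem.List.max? nums (fun x => x) with
    | none => exact absurd ((PySem.List.max?_eq_none_iff _ _).mp h) hpre
    | some m => exact ⟨m, rfl⟩
  have hmem : m ∈ nums := PySem.List.max?_mem hm
  obtain ⟨k, hkidx⟩ : ∃ k, PySem.List.index? nums m = some k := by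
    have hs := (PySem.List.index?_isSome_iff nums m).mpr hmem
    cases h : PySem.List.index? nums m with
    | none => rw [h] at hs; simp at hs
    | some k => exact ⟨k, rfl⟩
  obtain ⟨hk, hnk, -⟩ := PySem.List.getElem_of_index?_eq_some hkidx
  rw [hm]
  dsimp only
  rw [hkidx]
  dsimp only
  rw [PySem.List.foldl_append_ite_eq_filter
        (fun i => i ≠ (k : Int) ∧ PySem.List.pyGetD nums i 0 * 2 ≤ m)]
  rw [PySem.List.pyRange_zero_natCast, List.filter_map, List.nil_append, List.length_map]
  rw [PySem.List.slice_to_natCast]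
  have hc1 : ((k : Int) + 1) = (((k + 1 : Nat)) : Int) := by push_cast; ring
  rw [hc1, PySem.List.slice_from_natCast]
  set q : Nat → Bool := fun j =>
    decide ((j : Int) ≠ (k : Int) ∧ PySem.List.pyGetD nums (j : Int) 0 * 2 ≤ m) with hq
  have hqk : q k = false := by simp [hq]
  have hqspec : ∀ j, (hj : j < nums.length) → (q j = true ↔ (j ≠ k ∧ nums[j] * 2 ≤ m)) := by
    intro j hj
    simp only [hq, decide_eq_true_eq, PySem.List.pyGetD_natCast, List.getD_eq_getElem?_getD,
      List.getElem?_eq_getElem hj, Option.getD_some, ne_eq, Nat.cast_inj]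
  have hP : (((List.filter q (List.range nums.length)).length : Int)
        = (nums.length : Int) - 1)
      ↔ (∀ j, (h : j < nums.length) → j ≠ k → nums[j] * 2 ≤ m) := by
    have hnat : (((List.filter q (List.range nums.length)).length : Int)
          = (nums.length : Int) - 1)
        ↔ (List.filter q (List.range nums.length)).length = nums.length - 1 := by omega
    rw [hnat, filter_range_len hk hqk]
    constructor
    · intro h j hj hjk
      exact ((hqspec j hj).mp (h j hj hjk)).2
    · intro h j hj hjk
      exact (hqspec j hj).mpr ⟨hjk, h j hj hjk⟩
  have hcomp : ((fun x : Int => decide (x ≠ (k : Int) ∧ PySem.List.pyGetD nums x 0 * 2 ≤ m))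
      ∘ fun j : Nat => (j : Int)) = q := rfl
  rw [hcomp]
  cases hrest : PySem.List.max? (List.take k nums ++ List.drop (k + 1) nums) (fun x => x) with
  | none =>
    dsimp only
    rw [if_pos]
    rw [hP]
    intro j hj hjk
    have : nums[j] ∈ List.take k nums ++ List.drop (k + 1) nums :=
      (mem_rest_iff hk _).mpr ⟨j, hj, hjk, rfl⟩
    rw [(PySem.List.max?_eq_none_iff _ _).mp hrest] at this
    simp at this
  | some m2 =>
    dsimp only
    have hm2mem := PySem.List.max?_mem hrest
    have hm2max : ∀ y ∈ List.take k nums ++ List.drop (k + 1) nums, y ≤ m2 :=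
      fun y hy => PySem.List.max?_isMax hrest y hy
    have hiff : (((List.filter q (List.range nums.length)).length : Int)
          = (nums.length : Int) - 1) ↔ (2 * m2 ≤ m) := by
      rw [hP]
      constructor
      · intro h
        obtain ⟨j, hj, hjk, hval⟩ := (mem_rest_iff hk m2).mp hm2mem
        have := h j hj hjk
        omega
      · intro h j hj hjk
        have : nums[j] ≤ m2 := hm2max _ ((mem_rest_iff hk _).mpr ⟨j, hj, hjk, rfl⟩)
        omega
    by_cases hcond : 2 * m2 ≤ m
    · rw [if_pos (hiff.mpr hcond), if_pos hcond]
    · rw [if_neg (fun hcc => hcond (hiff.mp hcc)), if_neg hcond]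

-- ===== VERDICT (by name: the statement is the Claim_ definition above) =====
theorem largest_double_spec : Claim_equal_largest_double := by
  intro nums _ hpre
  exact largest_double_main nums hpre
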